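-- pv_equiv track=rewrite | github.com/plisovyi1/Kyrgistan | make_table_kyrgiz_all_occurances.py | occurances
-- ===== SOURCE A (Python) =====
-- def occurances(data, key_terms, excpetion_terms):
--     word_found = "---"
--     already_found = []
--
--     number_of_occurances = 0
--     number_non_unique_occurances = 0
--     for word in data.split():
--         if any (x in word for x in key_terms):
--             word = word.replace(',', '')
--             if any (x in word for x in excpetion_terms):
--                 continue
--             else:
--                 number_non_unique_occurances = number_non_unique_occurances + 1
--                 if any (x in word for x in already_found):
--                     continue
--                 else:
--                     number_of_occurances = number_of_occurances + 1
--                     already_found.append(word)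
--     return number_of_occurances, number_non_unique_occurances
-- ===== SOURCE B (Python) =====
-- def occurances(data, key_terms, excpetion_terms):
--     # Pass 1: collect the comma-stripped candidate words (key-term hit on the
--     # original word, no exception term in the stripped word).
--     candidates = []
--     for w in data.split():
--         if any(x in w for x in key_terms):
--             s = w.replace(',', '')
--             if not any(x in s for x in excpetion_terms):
--                 candidates.append(s)
--     # Pass 2: a candidate is "unique" iff NO earlier candidate (kept or not) is a
--     # substring of it.  This index-based criterion needs no already-found list:
--     # it is equivalent to A's dedup because the substring relation is transitive,
--     # so a skipped earlier candidate is itself covered by an even earlier one.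
--     unique = 0
--     for i, c in enumerate(candidates):
--         if not any(p in c for p in candidates[:i]):
--             unique += 1
--     return unique, len(candidates)
-- ===== Notes on version B (the rewrite author's own statement) =====
-- stated objective: alternative
-- what changed: B eliminates A's maintained already_found list and its fused counters: one pass collects the comma-stripped candidate words (their count is the non-unique total), then a second pass counts a candidate as unique iff no EARLIER candidate (kept or not) is a substring of it, an index-based criterion equivalent to A's dedup by transitivity of the substring relation.
import Mathlib
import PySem

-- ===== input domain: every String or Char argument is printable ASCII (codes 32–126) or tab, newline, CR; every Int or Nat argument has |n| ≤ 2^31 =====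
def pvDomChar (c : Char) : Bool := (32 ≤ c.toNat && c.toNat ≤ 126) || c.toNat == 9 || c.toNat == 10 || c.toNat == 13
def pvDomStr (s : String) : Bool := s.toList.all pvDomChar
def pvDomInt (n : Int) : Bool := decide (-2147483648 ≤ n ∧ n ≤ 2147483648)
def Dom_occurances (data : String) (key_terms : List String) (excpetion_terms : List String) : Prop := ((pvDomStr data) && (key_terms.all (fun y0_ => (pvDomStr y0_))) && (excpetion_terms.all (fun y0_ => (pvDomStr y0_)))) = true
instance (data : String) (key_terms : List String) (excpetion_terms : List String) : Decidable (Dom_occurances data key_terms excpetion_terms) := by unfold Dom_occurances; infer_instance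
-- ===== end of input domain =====

-- ===== PORT A =====
-- one honest line: B drops A's maintained already_found list — it collects the candidate words in one
-- pass and then counts a candidate as unique iff NO earlier candidate is a substring of it (an
-- index-based criterion, correct because the substring relation is transitive); same cost, different algorithmic invariant.
def occStepA (key_terms excpetion_terms : List String)
    (st : List String × Int × Int) (word : String) : List String × Int × Int :=
  if key_terms.any (fun x => PySem.Str.isIn x word) then
    let word := PySem.Str.replace word "," ""
    if excpetion_terms.any (fun x => PySem.Str.isIn x word) then st
    else
      let n := st.2.2 + 1
      if st.1.any (fun x => PySem.Str.isIn x word) then (st.1, st.2.1, n)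
      else (st.1 ++ [word], st.2.1 + 1, n)
  else st

def occurances (data : String) (key_terms : List String) (excpetion_terms : List String) : Int × Int :=
  let r := (PySem.Str.split₀ data).foldl (occStepA key_terms excpetion_terms) ([], 0, 0)
  (r.2.1, r.2.2)

-- ===== PORT B =====
def occCand (key_terms excpetion_terms : List String) (acc : List String) (w : String) : List String :=
  if key_terms.any (fun x => PySem.Str.isIn x w) then
    let s := PySem.Str.replace w "," ""
    if !(excpetion_terms.any fun x => PySem.Str.isIn x s) then acc ++ [s] else acc
  else acc

def occurances_alt (data : String) (key_terms : List String) (excpetion_terms : List String) : Int × Int :=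
  let candidates := (PySem.Str.split₀ data).foldl (occCand key_terms excpetion_terms) []
  let unique := (PySem.List.enumerate candidates).foldl
    (fun (u : Int) ic =>
      if !((PySem.List.slice candidates none (some ic.1)).any fun p => PySem.Str.isIn p ic.2)
      then u + 1 else u) 0
  (unique, (candidates.length : Int))

-- ===== PRECONDITION & SPEC =====
def Spec_occurances (data : String) (key_terms : List String) (excpetion_terms : List String) (out : Int × Int) : Prop := out = occurances_alt data key_terms excpetion_terms
instance (data : String) (key_terms : List String) (excpetion_terms : List String) (out : Int × Int) : Decidable (Spec_occurances data key_terms excpetion_terms out) := by unfold Spec_occurances; infer_instance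

-- ===== CLAIM (what is proved, stated in full; the proofs are below) =====
def Claim_equal_occurances : Prop := ∀ (data : String) (key_terms : List String) (excpetion_terms : List String), Dom_occurances data key_terms excpetion_terms → Spec_occurances data key_terms excpetion_terms (occurances data key_terms excpetion_terms)

-- ===== LEMMAS AND PROOFS =====

-- proof-only helpers: the filter-map form of the candidate pass, A's dedup step, and the
-- "count with growing prefix" recursion that characterises B's second pass
def occCandidate (key_terms excpetion_terms : List String) (word : String) : Option String :=
  if !key_terms.any (fun x => PySem.Str.isIn x word) then none
  else
    let stripped := PySem.Str.replace word "," ""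
    if excpetion_terms.any (fun x => PySem.Str.isIn x stripped) then none
    else some stripped

def occDedup (al : List String) (w : String) : List String :=
  if !al.any (fun x => PySem.Str.isIn x w) then al ++ [w] else al

def bcount (ps : List String) : List String → Int
  | [] => 0
  | c :: cs => (if ps.any (fun p => PySem.Str.isIn p c) then (0 : Int) else 1) + bcount (ps ++ [c]) cs

theorem occ_isIn_trans {a b c : String}
    (h1 : PySem.Str.isIn a b = true) (h2 : PySem.Str.isIn b c = true) :
    PySem.Str.isIn a c = true := by
  simp only [PySem.Str.isIn_eq, PySem.Chars.isIn_iff_infix] at *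
  exact h1.trans h2

-- B's first pass builds exactly the filter-map of the word list
theorem occ_cand_filterMap (key_terms excpetion_terms : List String) (ws : List String) :
    ∀ acc, ws.foldl (occCand key_terms excpetion_terms) acc
      = acc ++ ws.filterMap (occCandidate key_terms excpetion_terms) := by
  induction ws with
  | nil => intro acc; simp
  | cons w ws ih =>
    intro acc
    rw [List.foldl_cons, List.filterMap_cons]
    by_cases hk : (key_terms.any fun x => PySem.Str.isIn x w) = true
    · by_cases he : (excpetion_terms.any fun x => PySem.Str.isIn x (PySem.Str.replace w "," "")) = true
      · have hb : occCand key_terms excpetion_terms acc w = acc := by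
          unfold occCand
          rw [if_pos hk, if_neg]
          simpa using he
        have hc : occCandidate key_terms excpetion_terms w = none := by
          unfold occCandidate
          rw [if_neg (by simpa using hk), if_pos he]
        rw [hb, hc, ih]
      · have hb : occCand key_terms excpetion_terms acc w
            = acc ++ [PySem.Str.replace w "," ""] := by
          unfold occCand
          rw [if_pos hk, if_pos]
          simpa using he
        have hc : occCandidate key_terms excpetion_terms w
            = some (PySem.Str.replace w "," "") := by
          unfold occCandidate
          rw [if_neg (by simpa using hk), if_neg he]
        rw [hb, hc, ih]
        simp
    · have hb : occCand key_terms excpetion_terms acc w = acc := by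
        unfold occCand
        rw [if_neg hk]
      have hc : occCandidate key_terms excpetion_terms w = none := by
        unfold occCandidate
        rw [if_pos]
        simpa using hk
      rw [hb, hc, ih]

-- invariant linking A's fused fold to candidates + dedup fold, generalizing the running state
theorem occ_key (key_terms excpetion_terms : List String) (ws : List String) :
    ∀ (al : List String) (u n : Int),
    ws.foldl (occStepA key_terms excpetion_terms) (al, u, n) =
      ((ws.filterMap (occCandidate key_terms excpetion_terms)).foldl occDedup al,
       u + (((ws.filterMap (occCandidate key_terms excpetion_terms)).foldl occDedup al).length : Int)
         - (al.length : Int),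
       n + ((ws.filterMap (occCandidate key_terms excpetion_terms)).length : Int)) := by
  induction ws with
  | nil => intro al u n; simp
  | cons w ws ih =>
    intro al u n
    rw [List.foldl_cons, List.filterMap_cons]
    by_cases hk : (key_terms.any fun x => PySem.Str.isIn x w) = true
    · by_cases he : (excpetion_terms.any fun x => PySem.Str.isIn x (PySem.Str.replace w "," "")) = true
      · have hc : occCandidate key_terms excpetion_terms w = none := by
          unfold occCandidate
          rw [if_neg (by simpa using hk), if_pos he]
        have hs : occStepA key_terms excpetion_terms (al, u, n) w = (al, u, n) := by
          unfold occStepA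
          rw [if_pos hk, if_pos he]
        rw [hc, hs, ih]
      · have hc : occCandidate key_terms excpetion_terms w
            = some (PySem.Str.replace w "," "") := by
          unfold occCandidate
          rw [if_neg (by simpa using hk), if_neg he]
        rw [hc]
        by_cases ha : (al.any fun x => PySem.Str.isIn x (PySem.Str.replace w "," "")) = true
        · have hs : occStepA key_terms excpetion_terms (al, u, n) w = (al, u, n + 1) := by
            unfold occStepA
            rw [if_pos hk, if_neg he, if_pos ha]
          have hd : occDedup al (PySem.Str.replace w "," "") = al := by
            unfold occDedup
            rw [if_neg]
            simpa using ha
          rw [hs, ih, List.foldl_cons, hd]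
          refine Prod.ext rfl (Prod.ext rfl ?_)
          simp only [List.length_cons]
          push_cast
          ring
        · have hs : occStepA key_terms excpetion_terms (al, u, n) w
              = (al ++ [PySem.Str.replace w "," ""], u + 1, n + 1) := by
            unfold occStepA
            rw [if_pos hk, if_neg he, if_neg ha]
          have hd : occDedup al (PySem.Str.replace w "," "")
              = al ++ [PySem.Str.replace w "," ""] := by
            unfold occDedup
            rw [if_pos]
            simpa using ha
          rw [hs, ih, List.foldl_cons, hd]
          refine Prod.ext rfl (Prod.ext ?_ ?_)
          · simp only [List.length_append, List.length_cons, List.length_nil]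
            push_cast
            ring
          · simp only [List.length_cons]
            push_cast
            ring
    · have hc : occCandidate key_terms excpetion_terms w = none := by
        unfold occCandidate
        rw [if_pos]
        simpa using hk
      have hs : occStepA key_terms excpetion_terms (al, u, n) w = (al, u, n) := by
        unfold occStepA
        rw [if_neg hk]
      rw [hc, hs, ih]

-- the dedup fold's growth is B's prefix-based count, for any state al equivalent (by substring
-- coverage) to the processed prefix ps; this is where transitivity of the substring relation enters
theorem occ_dedup_len (cs : List String) :
    ∀ (ps al : List String),
    (∀ w, al.any (fun x => PySem.Str.isIn x w) = ps.any (fun x => PySem.Str.isIn x w)) →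
    ((cs.foldl occDedup al).length : Int) = (al.length : Int) + bcount ps cs := by
  induction cs with
  | nil => intro ps al _; simp [bcount]
  | cons c cs ih =>
    intro ps al h
    rw [List.foldl_cons]
    by_cases ha : (al.any fun x => PySem.Str.isIn x c) = true
    · have hp : (ps.any fun x => PySem.Str.isIn x c) = true := by rw [← h]; exact ha
      have hd : occDedup al c = al := by
        unfold occDedup
        rw [if_neg]
        simpa using ha
      have h' : ∀ w, al.any (fun x => PySem.Str.isIn x w)
          = (ps ++ [c]).any (fun x => PySem.Str.isIn x w) := by
        intro w
        rw [List.any_append, ← h]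
        cases hw : PySem.Str.isIn c w with
        | true =>
          obtain ⟨x, hx, hxc⟩ := List.any_eq_true.mp ha
          have hal : al.any (fun x => PySem.Str.isIn x w) = true :=
            List.any_eq_true.mpr ⟨x, hx, occ_isIn_trans hxc hw⟩
          rw [hal]
          simp
        | false =>
          have hc1 : [c].any (fun x => PySem.Str.isIn x w) = false := by
            simp only [List.any_cons, List.any_nil, Bool.or_false]
            exact hw
          rw [hc1, Bool.or_false]
      rw [hd, ih (ps ++ [c]) al h']
      simp only [bcount]
      rw [if_pos hp]
      ring
    · have hp : (ps.any fun x => PySem.Str.isIn x c) = false := by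
        rw [← h]; simpa using ha
      have hd : occDedup al c = al ++ [c] := by
        unfold occDedup
        rw [if_pos]
        simpa using ha
      have h' : ∀ w, (al ++ [c]).any (fun x => PySem.Str.isIn x w)
          = (ps ++ [c]).any (fun x => PySem.Str.isIn x w) := by
        intro w
        rw [List.any_append, List.any_append, h]
      rw [hd, ih (ps ++ [c]) (al ++ [c]) h']
      simp only [bcount, List.length_append, List.length_cons, List.length_nil]
      rw [if_neg (by simpa using hp)]
      push_cast
      ring

-- B's enumerate/slice loop is the prefix-based count
theorem occ_enumfold (cs : List String) :
    ∀ (full : List String) (k : Nat) (u : Int), full.drop k = cs →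
    (PySem.List.enumerate cs (k : Int)).foldl
      (fun (u : Int) ic =>
        if !((PySem.List.slice full none (some ic.1)).any fun p => PySem.Str.isIn p ic.2)
        then u + 1 else u) u
      = u + bcount (full.take k) cs := by
  induction cs with
  | nil => intro full k u _; simp [bcount]
  | cons c cs ih =>
    intro full k u hdrop
    rw [PySem.List.enumerate_cons, List.foldl_cons]
    have hsl : PySem.List.slice full none (some (k : Int)) = full.take k :=
      PySem.List.slice_to_natCast full k
    have hget : full[k]? = some c := by
      have h0 : (full.drop k)[0]? = some c := by rw [hdrop]; rfl
      simpa [List.getElem?_drop] using h0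
    have htake : full.take (k + 1) = full.take k ++ [c] := by
      rw [List.take_add_one, hget]
      rfl
    have hdrop' : full.drop (k + 1) = cs := by
      have hh : (full.drop k).drop 1 = cs := by rw [hdrop]; rfl
      simpa [List.drop_drop, Nat.add_comm] using hh
    have hcast : (k : Int) + 1 = ((k + 1 : Nat) : Int) := by push_cast; ring
    rw [hsl, hcast]
    by_cases hp : ((full.take k).any fun p => PySem.Str.isIn p c) = true
    · rw [if_neg (by simpa using hp), ih full (k + 1) u hdrop', htake]
      simp only [bcount]
      rw [if_pos hp]
      ring
    · have hp' : ((full.take k).any fun p => PySem.Str.isIn p c) = false := by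
        simpa using hp
      rw [if_pos (by simpa using hp'), ih full (k + 1) (u + 1) hdrop', htake]
      simp only [bcount]
      rw [if_neg (by simpa using hp')]
      ring

-- ===== VERDICT (by name: the statement is the Claim_ definition above) =====
theorem occurances_spec : Claim_equal_occurances := by
  intro data key_terms excpetion_terms _
  unfold Spec_occurances occurances occurances_alt
  rw [occ_key, occ_cand_filterMap]
  simp only [List.nil_append]
  set cs := (PySem.Str.split₀ data).filterMap (occCandidate key_terms excpetion_terms) with hcs
  have h1 : ((cs.foldl occDedup []).length : Int) = bcount [] cs := by
    have hh := occ_dedup_len cs [] [] (fun w => rfl)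
    simpa using hh
  have h2 := occ_enumfold cs cs 0 0 rfl
  simp only [Nat.cast_zero, List.take_zero, zero_add] at h2
  rw [h1, ← h2]
  simp
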